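-- pv_equiv track=rewrite | github.com/boss9293-ops/Marketflow | marketflow/backend/scripts/build_daily_report.py | _apply_alert_budget
-- ===== SOURCE A (Python) =====
-- from typing import Any, Dict, List, Optional, Tuple
--
-- ALERT_BUDGET = 3
--
-- _ALERT_PRIORITY: Dict[str, int] = {
--     'STRUCTURAL': 0,
--     'EVENT': 1,
--     'VCP': 2,
--     'SMART_MONEY': 3,
-- }
--
-- def _apply_alert_budget(raw_alerts: List[Dict]) -> Tuple[List[Dict], int]:
--     """Sort by priority, dedup by type, limit to ALERT_BUDGET.
--     Returns (visible_alerts, hidden_count).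
--     """
--     sorted_alerts = sorted(raw_alerts, key=lambda a: _ALERT_PRIORITY.get(a.get('type', ''), 99))
--     seen_types: set = set()
--     visible: List[Dict] = []
--     for a in sorted_alerts:
--         a_type = a.get('type', '')
--         if a_type not in seen_types:
--             visible.append(a)
--             seen_types.add(a_type)
--         if len(visible) >= ALERT_BUDGET:
--             break
--     hidden_count = len(raw_alerts) - len(visible)
--     return visible, max(0, hidden_count)
-- ===== SOURCE B (Python) =====
-- from typing import Dict, List, Tuple
--
-- ALERT_BUDGET = 3
--
-- _ALERT_PRIORITY: Dict[str, int] = {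
--     'STRUCTURAL': 0,
--     'EVENT': 1,
--     'VCP': 2,
--     'SMART_MONEY': 3,
-- }
--
-- def _apply_alert_budget(raw_alerts: List[Dict]) -> Tuple[List[Dict], int]:
--     """Keep the first alert of each type, rank by priority, cap at ALERT_BUDGET."""
--     first_by_type: Dict[str, Dict] = {}
--     for a in raw_alerts:
--         ty = a.get('type', '')
--         if ty not in first_by_type:
--             first_by_type[ty] = a
--     ranked = sorted(first_by_type.values(),
--                     key=lambda a: _ALERT_PRIORITY.get(a.get('type', ''), 99))
--     visible = ranked[:ALERT_BUDGET]
--     return visible, max(0, len(raw_alerts) - len(visible))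
-- ===== Notes on version B (the rewrite author's own statement) =====
-- stated objective: simpler
-- what changed: B inverts A's order of operations: instead of stable-sorting all alerts and then deduplicating by type with an early break, B first collects the first alert per type in one dict pass, then stable-sorts only those representatives by priority and slices off the budget.
import Mathlib
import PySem

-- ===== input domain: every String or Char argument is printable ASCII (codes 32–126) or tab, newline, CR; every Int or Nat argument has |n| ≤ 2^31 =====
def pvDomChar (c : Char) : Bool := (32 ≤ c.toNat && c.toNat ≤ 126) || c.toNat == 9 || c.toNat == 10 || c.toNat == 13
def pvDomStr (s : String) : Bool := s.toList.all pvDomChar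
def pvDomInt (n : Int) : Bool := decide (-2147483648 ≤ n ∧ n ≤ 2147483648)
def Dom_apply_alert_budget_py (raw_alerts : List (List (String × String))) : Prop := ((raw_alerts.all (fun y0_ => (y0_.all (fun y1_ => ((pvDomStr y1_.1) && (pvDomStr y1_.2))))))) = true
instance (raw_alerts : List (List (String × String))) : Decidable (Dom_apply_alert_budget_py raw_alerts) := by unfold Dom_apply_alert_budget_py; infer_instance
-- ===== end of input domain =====

-- B inverts A's pipeline: one dict pass keeping the first alert per type, then a stable sort of
-- those representatives by priority and a [:ALERT_BUDGET] slice, instead of A's sort-everything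
-- then dedup-with-break; proved to return the same (visible, hidden) pair on every input.


-- ===== PORT A =====

-- _ALERT_PRIORITY
def pvPrio : PySem.Dict String Int :=
  PySem.Dict.mk [("STRUCTURAL", 0), ("EVENT", 1), ("VCP", 2), ("SMART_MONEY", 3)]

-- a.get('type', '')
def pvType (a : List (String × String)) : String := PySem.Dict.getD (PySem.Dict.mk a) "type" ""

-- the sort key: _ALERT_PRIORITY.get(a.get('type', ''), 99)
def pvKey (a : List (String × String)) : Int := PySem.Dict.getD pvPrio (pvType a) 99

-- A's 'for a in sorted_alerts: …' loop with the 'break' once len(visible) >= ALERT_BUDGET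
def pvALoop : List (List (String × String)) → PySem.Set String → List (List (String × String)) →
    List (List (String × String))
  | [], _, visible => visible
  | a :: rest, seen, visible =>
    let a_type := pvType a
    let st :=
      if PySem.Set.contains seen a_type then (visible, seen)
      else (visible ++ [a], PySem.Set.add seen a_type)
    if 3 ≤ st.1.length then st.1 else pvALoop rest st.2 st.1

def apply_alert_budget_py (raw_alerts : List (List (String × String))) :
    (List (List (String × String))) × Int :=
  let sorted_alerts := PySem.List.sorted raw_alerts pvKey false
  let visible := pvALoop sorted_alerts PySem.Set.empty []
  let hidden_count : Int := (raw_alerts.length : Int) - (visible.length : Int)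
  (visible, max 0 hidden_count)

-- ===== PORT B =====

def apply_alert_budget_py_alt (raw_alerts : List (List (String × String))) :
    (List (List (String × String))) × Int :=
  let first_by_type := raw_alerts.foldl
    (fun d a =>
      let ty := pvType a
      if PySem.Dict.contains d ty then d else PySem.Dict.insert d ty a)
    PySem.Dict.empty
  let ranked := PySem.List.sorted (PySem.Dict.values first_by_type) pvKey false
  let visible := PySem.List.slice ranked none (some 3)
  (visible, max 0 ((raw_alerts.length : Int) - (visible.length : Int)))

-- ===== PRECONDITION & SPEC =====
def Spec_apply_alert_budget_py (raw_alerts : List (List (String × String))) (out : (List (List (String × String))) × Int) : Prop := out = apply_alert_budget_py_alt raw_alerts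
instance (raw_alerts : List (List (String × String))) (out : (List (List (String × String))) × Int) : Decidable (Spec_apply_alert_budget_py raw_alerts out) := by unfold Spec_apply_alert_budget_py; infer_instance

-- ===== CLAIM (what is proved, stated in full; the proofs are below) =====
def Claim_equal_apply_alert_budget_py : Prop := ∀ (raw_alerts : List (List (String × String))), Dom_apply_alert_budget_py raw_alerts → Spec_apply_alert_budget_py raw_alerts (apply_alert_budget_py raw_alerts)

-- ===== LEMMAS AND PROOFS =====

-- Proof-side dedup-by-type without the budget break (list of seen types, first occurrences kept)
def pvDGo (seen : List String) : List (List (String × String)) → List (List (String × String))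
  | [] => []
  | a :: rest =>
    if pvType a ∈ seen then pvDGo seen rest else a :: pvDGo (seen ++ [pvType a]) rest

-- same type ⇒ same key
theorem pvKey_congr {x y : List (String × String)} (h : pvType x = pvType y) : pvKey x = pvKey y := by
  simp [pvKey, h]

theorem pvDGo_cons (seen : List String) (a : List (String × String))
    (rest : List (List (String × String))) :
    pvDGo seen (a :: rest) =
      if pvType a ∈ seen then pvDGo seen rest else a :: pvDGo (seen ++ [pvType a]) rest := rfl

theorem pvDGo_subset {seen : List String} {s : List (List (String × String))}
    {z : List (String × String)} (hz : z ∈ pvDGo seen s) : z ∈ s := by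
  induction s generalizing seen with
  | nil => simpa [pvDGo] using hz
  | cons a rest ih =>
    by_cases h : pvType a ∈ seen
    · simp only [pvDGo, if_pos h] at hz
      exact List.mem_cons_of_mem _ (ih hz)
    · simp only [pvDGo, if_neg h, List.mem_cons] at hz
      rcases hz with rfl | hz
      · exact List.mem_cons_self
      · exact List.mem_cons_of_mem _ (ih hz)

theorem pvDGo_congr {seen1 seen2 : List String} {s : List (List (String × String))}
    (h : ∀ a ∈ s, (pvType a ∈ seen1 ↔ pvType a ∈ seen2)) : pvDGo seen1 s = pvDGo seen2 s := by
  induction s generalizing seen1 seen2 with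
  | nil => rfl
  | cons a rest ih =>
    have ha := h a List.mem_cons_self
    by_cases h1 : pvType a ∈ seen1
    · have h2 : pvType a ∈ seen2 := ha.mp h1
      simp only [pvDGo, if_pos h1, if_pos h2]
      exact ih (fun b hb => h b (List.mem_cons_of_mem _ hb))
    · have h2 : pvType a ∉ seen2 := fun hx => h1 (ha.mpr hx)
      simp only [pvDGo, if_neg h1, if_neg h2]
      refine congrArg _ (ih ?_)
      intro b hb
      have := h b (List.mem_cons_of_mem _ hb)
      simp only [List.mem_append, List.mem_singleton]
      tauto

theorem pvDGo_append_singleton (seen : List String) (xs : List (List (String × String)))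
    (a : List (String × String)) :
    pvDGo seen (xs ++ [a]) =
      pvDGo seen xs ++ (if pvType a ∈ seen ∨ pvType a ∈ xs.map pvType then [] else [a]) := by
  induction xs generalizing seen with
  | nil => by_cases h : pvType a ∈ seen <;> simp [pvDGo, h]
  | cons x rest ih =>
    by_cases hx : pvType x ∈ seen
    · rw [List.cons_append, pvDGo_cons, if_pos hx, pvDGo_cons, if_pos hx, ih]
      have : (pvType a ∈ seen ∨ pvType a ∈ rest.map pvType) ↔
          (pvType a ∈ seen ∨ pvType a ∈ (x :: rest).map pvType) := by
        simp only [List.map_cons, List.mem_cons]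
        constructor <;> rintro (h | h) <;> try tauto
        rcases h with h | h
        · exact Or.inl (h ▸ hx)
        · exact Or.inr h
      rw [if_congr this rfl rfl]
    · rw [List.cons_append, pvDGo_cons, if_neg hx, pvDGo_cons, if_neg hx, ih, List.cons_append]
      have : (pvType a ∈ seen ++ [pvType x] ∨ pvType a ∈ rest.map pvType) ↔
          (pvType a ∈ seen ∨ pvType a ∈ (x :: rest).map pvType) := by
        simp only [List.mem_append, List.mem_singleton, List.map_cons, List.mem_cons]
        tauto
      rw [if_congr this rfl rfl]

-- shorthand for the comparator PySem's insertion sort uses with key pvKey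
theorem pvInsertBy_head {a : List (String × String)} {LL : List (List (String × String))}
    (h : ∀ z ∈ LL, pvKey a < pvKey z) :
    PySem.List.insertBy (fun p q => decide (pvKey p < pvKey q)) a LL = a :: LL := by
  cases LL with
  | nil => rfl
  | cons z zs =>
    have hz := h z List.mem_cons_self
    simp [PySem.List.insertBy, hz]

theorem pvInsertBy_cons {a y : List (String × String)} {ys : List (List (String × String))} :
    PySem.List.insertBy (fun p q => decide (pvKey p < pvKey q)) a (y :: ys) =
      if pvKey a < pvKey y then a :: y :: ys
      else y :: PySem.List.insertBy (fun p q => decide (pvKey p < pvKey q)) a ys := by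
  by_cases h : pvKey a < pvKey y <;> simp [PySem.List.insertBy, h]

-- inserting an alert whose type was already seen changes nothing
theorem pvDGo_insertBy_seen {a : List (String × String)} {seen : List String}
    {s : List (List (String × String))} (h : pvType a ∈ seen) :
    pvDGo seen (PySem.List.insertBy (fun p q => decide (pvKey p < pvKey q)) a s) =
      pvDGo seen s := by
  induction s generalizing seen with
  | nil => simp [PySem.List.insertBy, pvDGo, h]
  | cons y ys ih =>
    rw [pvInsertBy_cons]
    by_cases hb : pvKey a < pvKey y
    · rw [if_pos hb, pvDGo_cons, if_pos h]
    · rw [if_neg hb, pvDGo_cons, pvDGo_cons]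
      by_cases hy : pvType y ∈ seen
      · rw [if_pos hy, if_pos hy]
        exact ih h
      · rw [if_neg hy, if_neg hy]
        exact congrArg _ (ih (by simp [h]))

-- inserting an alert whose type occurs in the (key-sorted) list changes nothing
theorem pvDGo_insertBy_dup {a : List (String × String)} {seen : List String}
    {s : List (List (String × String))}
    (hs : s.Pairwise (fun p q => pvKey p ≤ pvKey q))
    (hns : pvType a ∉ seen) (hdup : ∃ y ∈ s, pvType y = pvType a) :
    pvDGo seen (PySem.List.insertBy (fun p q => decide (pvKey p < pvKey q)) a s) =
      pvDGo seen s := by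
  induction s generalizing seen with
  | nil => simp at hdup
  | cons y ys ih =>
    rw [pvInsertBy_cons]
    by_cases hb : pvKey a < pvKey y
    · exfalso
      rcases hdup with ⟨z, hz, hzt⟩
      have hkz : pvKey z = pvKey a := pvKey_congr hzt
      rcases List.mem_cons.mp hz with rfl | hz'
      · omega
      · have := (List.pairwise_cons.mp hs).1 z hz'
        omega
    · simp only [if_neg hb]
      by_cases hy : pvType y ∈ seen
      · simp only [pvDGo, if_pos hy]
        have hd' : ∃ z ∈ ys, pvType z = pvType a := by
          rcases hdup with ⟨z, hz, hzt⟩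
          rcases List.mem_cons.mp hz with rfl | hz'
          · exact absurd (hzt ▸ hy) hns
          · exact ⟨z, hz', hzt⟩
        exact ih (List.pairwise_cons.mp hs).2 hns hd'
      · simp only [pvDGo, if_neg hy]
        by_cases hya : pvType y = pvType a
        · exact congrArg _ (pvDGo_insertBy_seen (by simp [hya]))
        · have hd' : ∃ z ∈ ys, pvType z = pvType a := by
            rcases hdup with ⟨z, hz, hzt⟩
            rcases List.mem_cons.mp hz with rfl | hz'
            · exact absurd hzt hya
            · exact ⟨z, hz', hzt⟩
          refine congrArg _ (ih (List.pairwise_cons.mp hs).2 ?_ hd')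
          simp only [List.mem_append, List.mem_singleton]
          rintro (h | h)
          · exact hns h
          · exact hya h.symm

-- inserting an alert of a fresh type commutes with the dedup
theorem pvDGo_insertBy_fresh {a : List (String × String)} {seen : List String}
    {s : List (List (String × String))}
    (hs : s.Pairwise (fun p q => pvKey p ≤ pvKey q))
    (hns : pvType a ∉ seen) (hfresh : ∀ y ∈ s, pvType y ≠ pvType a) :
    pvDGo seen (PySem.List.insertBy (fun p q => decide (pvKey p < pvKey q)) a s) =
      PySem.List.insertBy (fun p q => decide (pvKey p < pvKey q)) a (pvDGo seen s) := by
  induction s generalizing seen with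
  | nil => simp [PySem.List.insertBy, pvDGo, hns]
  | cons y ys ih =>
    rw [pvInsertBy_cons]
    by_cases hb : pvKey a < pvKey y
    · have hall : ∀ z ∈ pvDGo seen (y :: ys), pvKey a < pvKey z := by
        intro z hz
        rcases List.mem_cons.mp (pvDGo_subset hz) with rfl | hz'
        · exact hb
        · have := (List.pairwise_cons.mp hs).1 z hz'
          omega
      rw [if_pos hb, pvInsertBy_head hall, pvDGo_cons, if_neg hns]
      refine congrArg _ (pvDGo_congr ?_)
      intro b hb'
      have hbne : pvType b ≠ pvType a := hfresh b hb'
      simp only [List.mem_append, List.mem_singleton]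
      tauto
    · rw [if_neg hb, pvDGo_cons, pvDGo_cons]
      by_cases hy : pvType y ∈ seen
      · rw [if_pos hy, if_pos hy]
        exact ih (List.pairwise_cons.mp hs).2 hns
          (fun z hz => hfresh z (List.mem_cons_of_mem _ hz))
      · rw [if_neg hy, if_neg hy, pvInsertBy_cons, if_neg hb]
        refine congrArg _ (ih (List.pairwise_cons.mp hs).2 ?_
          (fun z hz => hfresh z (List.mem_cons_of_mem _ hz)))
        simp only [List.mem_append, List.mem_singleton]
        rintro (h | h)
        · exact hns h
        · exact hfresh y List.mem_cons_self h.symm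

-- the central commuting lemma: dedup-by-type of the stable sort = stable sort of the dedup
theorem pvDGo_sorted (xs : List (List (String × String))) :
    pvDGo [] (PySem.List.sorted xs pvKey false) = PySem.List.sorted (pvDGo [] xs) pvKey false := by
  induction xs using List.reverseRecOn with
  | nil => rfl
  | append_singleton xs a ih =>
    have hfold : PySem.List.sorted (xs ++ [a]) pvKey false =
        PySem.List.insertBy (fun p q => decide (pvKey p < pvKey q)) a
          (PySem.List.sorted xs pvKey false) := by
      rw [PySem.List.sorted_eq_foldl_insertBy, PySem.List.sorted_eq_foldl_insertBy,
        List.foldl_append]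
      rfl
    have hpw : (PySem.List.sorted xs pvKey false).Pairwise (fun p q => pvKey p ≤ pvKey q) :=
      PySem.List.sorted_pairwise xs pvKey
    rw [hfold, pvDGo_append_singleton]
    by_cases hdup : pvType a ∈ xs.map pvType
    · have hdup' : ∃ y ∈ PySem.List.sorted xs pvKey false, pvType y = pvType a := by
        rcases List.mem_map.mp hdup with ⟨y, hy, hyt⟩
        exact ⟨y, (PySem.List.mem_sorted _ _ _ _).mpr hy, hyt⟩
      rw [pvDGo_insertBy_dup hpw (by simp) hdup', ih]
      simp [hdup]
    · have hfresh : ∀ y ∈ PySem.List.sorted xs pvKey false, pvType y ≠ pvType a := by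
        intro y hy hne
        exact hdup (List.mem_map.mpr ⟨y, (PySem.List.mem_sorted _ _ _ _).mp hy, hne⟩)
      rw [pvDGo_insertBy_fresh hpw (by simp) hfresh, ih]
      rw [if_neg (by simp only [List.not_mem_nil, false_or]; exact hdup)]
      rw [PySem.List.sorted_eq_foldl_insertBy, PySem.List.sorted_eq_foldl_insertBy,
        List.foldl_append]
      rfl

-- A's loop is 'take 3' of the unbounded dedup
theorem pvALoop_eq (s : List (List (String × String))) (seen : List String)
    (visible : List (List (String × String))) (h : visible.length < 3) :
    pvALoop s seen visible = (visible ++ pvDGo seen s).take 3 := by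
  induction s generalizing seen visible with
  | nil =>
    simp only [pvALoop, pvDGo, List.append_nil]
    exact (List.take_of_length_le (by omega)).symm
  | cons a rest ih =>
    by_cases hmem : pvType a ∈ seen
    · have hc : PySem.Set.contains seen (pvType a) = true := by
        simp [PySem.Set.contains, hmem]
      simp only [pvALoop, hc, if_pos, ite_true, if_neg (by omega : ¬ 3 ≤ visible.length)]
      rw [ih seen visible h]
      simp [pvDGo, hmem]
    · have hc : PySem.Set.contains seen (pvType a) = false := by
        simp [PySem.Set.contains]
        exact hmem
      have hadd : PySem.Set.add seen (pvType a) = seen ++ [pvType a] := by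
        simp [PySem.Set.add, PySem.Set.contains]
        exact hmem
      simp only [pvALoop, hc, Bool.false_eq_true, if_false, hadd]
      by_cases h3 : 3 ≤ (visible ++ [a]).length
      · have hlen : (visible ++ [a]).length = 3 := by
          simp at h3 ⊢; omega
        rw [if_pos h3, pvDGo_cons, if_neg hmem,
          show visible ++ a :: pvDGo (seen ++ [pvType a]) rest =
            (visible ++ [a]) ++ pvDGo (seen ++ [pvType a]) rest by simp,
          List.take_left' hlen]
      · simp only [if_neg h3]
        rw [ih (seen ++ [pvType a]) (visible ++ [a]) (by simp at h3 ⊢; omega)]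
        rw [pvDGo_cons, if_neg hmem]
        simp

-- B's dict pass collects exactly the first alert of each type, in first-occurrence order
theorem pvDict_items (xs : List (List (String × String))) (d : PySem.Dict String (List (String × String)))
    (hnd : d.keys.Nodup) :
    (xs.foldl
      (fun d a =>
        let ty := pvType a
        if PySem.Dict.contains d ty then d else PySem.Dict.insert d ty a) d).items =
      d.items ++ (pvDGo d.keys xs).map (fun a => (pvType a, a)) := by
  induction xs generalizing d with
  | nil => simp [pvDGo]
  | cons a rest ih =>
    by_cases hc : PySem.Dict.contains d (pvType a) = true
    · have hmem : pvType a ∈ d.keys := (PySem.Dict.contains_iff_mem_keys _ _).mp hc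
      simp only [List.foldl_cons, hc, if_pos, ite_true]
      rw [ih d hnd]
      simp [pvDGo, hmem]
    · have hcf : PySem.Dict.contains d (pvType a) = false := by
        cases hx : PySem.Dict.contains d (pvType a) with
        | true => exact absurd hx hc
        | false => rfl
      have hmem : pvType a ∉ d.keys := fun hx =>
        hc ((PySem.Dict.contains_iff_mem_keys _ _).mpr hx)
      simp only [List.foldl_cons, hcf, Bool.false_eq_true, if_false]
      rw [ih (PySem.Dict.insert d (pvType a) a)
        (PySem.Dict.nodup_keys_insert _ _ _ hnd)]
      rw [PySem.Dict.items_insert_of_not_contains _ _ hcf,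
        PySem.Dict.keys_insert_of_not_contains _ _ hcf]
      simp only [pvDGo, if_neg hmem, List.map_cons, List.append_assoc, List.cons_append,
        List.nil_append]

-- ===== VERDICT (by name: the statement is the Claim_ definition above) =====
theorem apply_alert_budget_py_spec : Claim_equal_apply_alert_budget_py := by
  intro raw _
  show apply_alert_budget_py raw = apply_alert_budget_py_alt raw
  have hvalues :
      PySem.Dict.values (raw.foldl
        (fun d a =>
          let ty := pvType a
          if PySem.Dict.contains d ty then d else PySem.Dict.insert d ty a) PySem.Dict.empty) =
      pvDGo [] raw := by
    have := pvDict_items raw PySem.Dict.empty (by simp [PySem.Dict.keys_empty])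
    simp only [PySem.Dict.keys_empty] at this
    simp only [PySem.Dict.values, this]
    simp [PySem.Dict.empty, Function.comp_def]
  have hA : pvALoop (PySem.List.sorted raw pvKey false) PySem.Set.empty [] =
      (PySem.List.sorted (pvDGo [] raw) pvKey false).take 3 := by
    rw [pvALoop_eq _ _ _ (by simp)]
    show (pvDGo [] (PySem.List.sorted raw pvKey false)).take 3 = _
    rw [pvDGo_sorted]
  have hslice : PySem.List.slice (PySem.List.sorted (pvDGo [] raw) pvKey false) none (some 3) =
      (PySem.List.sorted (pvDGo [] raw) pvKey false).take 3 := by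
    exact_mod_cast PySem.List.slice_to_natCast _ 3
  simp only [apply_alert_budget_py, apply_alert_budget_py_alt, hvalues, hslice, hA]
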